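-- pv_equiv track=rewrite | github.com/ksayee/programming_assignments | python/CodingExercises/Testing.py | DistinctElementsWindowSizeK
-- ===== SOURCE A (Python) =====
-- def DistinctElementsWindowSizeK(ary, k):
--
--     dict={}
--
--     i=0
--     j=k-1
--
--     while j<len(ary):
--
--         tup=ary[i:j+1]
--         cnt=len(set(tup))
--         if cnt in dict.keys():
--             dict[cnt].append(tup)
--         else:
--             tmp=[]
--             tmp.append(tup)
--             dict[cnt]=tmp
--         i=i+1
--         j=j+1
--
--     return dict
-- ===== SOURCE B (Python) =====
-- def DistinctElementsWindowSizeK(ary, k):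
--     # One pass: sliding window of size k with a frequency map and an
--     # incrementally maintained count of distinct elements.
--     n = len(ary)
--     groups = {}
--     freq = {}
--     distinct = 0
--     for j in range(n):
--         x = ary[j]
--         c = freq.get(x, 0)
--         freq[x] = c + 1
--         if c == 0:
--             distinct += 1
--         if j >= k:
--             y = ary[j - k]
--             freq[y] = freq[y] - 1
--             if freq[y] == 0:
--                 distinct -= 1
--         if j >= k - 1:
--             groups.setdefault(distinct, []).append(ary[j - k + 1:j + 1])
--     return groups
-- ===== Notes on version B (the rewrite author's own statement) =====
-- stated objective: alternative
-- what changed: A rebuilds a Python set of every length-k slice to count its distinct elements; B makes one pass with a sliding frequency map and an incrementally maintained distinct count (measured ~2x faster at mid sizes, but both are dominated by materialising the O(n*k) windows, so no asymptotic speed claim).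
-- outside the precondition, e.g. on DistinctElementsWindowSizeK([1, 2], 0): A returns {0: [[], [], []]}, B returns {0: [[], []]}; on DistinctElementsWindowSizeK([1, 2, 3], -1): A returns {2: [[1, 2]], 0: [[], [], [], []]}, B raises KeyError
import Mathlib
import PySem

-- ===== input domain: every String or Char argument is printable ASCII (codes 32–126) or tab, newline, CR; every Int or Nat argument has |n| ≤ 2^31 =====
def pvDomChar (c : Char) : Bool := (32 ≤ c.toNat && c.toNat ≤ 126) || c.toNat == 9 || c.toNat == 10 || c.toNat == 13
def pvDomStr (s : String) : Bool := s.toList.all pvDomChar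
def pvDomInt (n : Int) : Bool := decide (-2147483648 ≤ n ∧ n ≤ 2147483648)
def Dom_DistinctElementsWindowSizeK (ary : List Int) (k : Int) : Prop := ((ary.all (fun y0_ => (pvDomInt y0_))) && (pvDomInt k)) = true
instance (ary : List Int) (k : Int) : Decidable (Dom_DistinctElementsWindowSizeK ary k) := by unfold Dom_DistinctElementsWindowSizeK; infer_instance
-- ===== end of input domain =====

-- B replaces A's per-window set construction by one sliding-window pass with a frequency map
-- and an incrementally maintained distinct count (objective: alternative algorithm).


-- ===== PORT A =====
-- while j < len(ary): tup = ary[i:j+1]; cnt = len(set(tup)); append tup under key cnt; i += 1; j += 1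
def pvLoopA (ary : List Int) (i j : Int) (d : PySem.Dict Int (List (List Int))) :
    PySem.Dict Int (List (List Int)) :=
  if h : j < PySem.List.len ary then
    let tup := PySem.List.slice ary (some i) (some (j + 1))
    let cnt : Int := ((PySem.Set.ofList tup).length : Int)
    let d' := if d.contains cnt
      then d.modify cnt [] (fun l => l ++ [tup])      -- dict[cnt].append(tup)
      else d.insert cnt [tup]                         -- tmp = [tup]; dict[cnt] = tmp
    pvLoopA ary (i + 1) (j + 1) d'
  else d
termination_by (PySem.List.len ary - j).toNat
decreasing_by simp only [PySem.List.len_eq] at *; omega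

def DistinctElementsWindowSizeK (ary : List Int) (k : Int) : List (Int × List (List Int)) :=
  (pvLoopA ary 0 (k - 1) PySem.Dict.empty).items

-- ===== PORT B =====
-- one step of B's for-loop over j in range(len(ary)); state = (freq, distinct, groups)
def pvAltStep (ary : List Int) (k : Int)
    (st : PySem.Dict Int Int × Int × PySem.Dict Int (List (List Int))) (j : Int) :
    PySem.Dict Int Int × Int × PySem.Dict Int (List (List Int)) :=
  let freq := st.1
  let distinct := st.2.1
  let groups := st.2.2
  let x := PySem.List.pyGetD ary j 0                  -- ary[j]; in range for j from range(len(ary))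
  let c := freq.getD x 0                              -- freq.get(x, 0)
  let freq := freq.insert x (c + 1)
  let distinct := if c = 0 then distinct + 1 else distinct
  let fd :=
    if k ≤ j then                                     -- if j >= k:
      let y := PySem.List.pyGetD ary (j - k) 0        -- ary[j-k]; 0 ≤ j-k < j under Pre_
      let freq := freq.insert y (freq.getD y 0 - 1)   -- freq[y] = freq[y] - 1 (y present under Pre_)
      (freq, if freq.getD y 0 = 0 then distinct - 1 else distinct)
    else (freq, distinct)
  let groups :=
    if k - 1 ≤ j then                                 -- if j >= k - 1:
      -- groups.setdefault(distinct, []).append(window): append to the entry, default []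
      groups.modify fd.2 []
        (fun l => l ++ [PySem.List.slice ary (some (j - k + 1)) (some (j + 1))])
    else groups
  (fd.1, fd.2, groups)

def DistinctElementsWindowSizeK_alt (ary : List Int) (k : Int) : List (Int × List (List Int)) :=
  ((PySem.List.pyRange 0 (PySem.List.len ary) 1).foldl (pvAltStep ary k)
    (PySem.Dict.empty, 0, PySem.Dict.empty)).2.2.items

-- ===== PRECONDITION & SPEC =====
-- Pre_ excludes k ≤ 0, where A still returns: its windows there are artefacts of the
-- implementation (k = 0 yields len+1 copies of the empty window; k < 0 slices wrap around via
-- Python's negative-bound slicing); B's sliding window naturally assumes a positive window size.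
def Pre_DistinctElementsWindowSizeK (ary : List Int) (k : Int) : Prop := 1 ≤ k
instance (ary : List Int) (k : Int) : Decidable (Pre_DistinctElementsWindowSizeK ary k) := by
  unfold Pre_DistinctElementsWindowSizeK; infer_instance

def pvWitness_DistinctElementsWindowSizeK : List Int × Int := ([1, 2, 1, 3], 2)

def Spec_DistinctElementsWindowSizeK (ary : List Int) (k : Int) (out : List (Int × List (List Int))) : Prop := out = DistinctElementsWindowSizeK_alt ary k
instance (ary : List Int) (k : Int) (out : List (Int × List (List Int))) : Decidable (Spec_DistinctElementsWindowSizeK ary k out) := by unfold Spec_DistinctElementsWindowSizeK; infer_instance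

-- ===== CLAIM (what is proved, stated in full; the proofs are below) =====
def Claim_equal_DistinctElementsWindowSizeK : Prop := ∀ (ary : List Int) (k : Int), Dom_DistinctElementsWindowSizeK ary k → Pre_DistinctElementsWindowSizeK ary k → Spec_DistinctElementsWindowSizeK ary k (DistinctElementsWindowSizeK ary k)

-- ===== LEMMAS AND PROOFS =====

-- the common abstract form: fold "append window w under key (#distinct of w)" over all windows
def pvCnt (w : List Int) : Int := ((PySem.Set.ofList w).length : Int)

def pvGStep (d : PySem.Dict Int (List (List Int))) (w : List Int) :
    PySem.Dict Int (List (List Int)) :=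
  d.modify (pvCnt w) [] (fun l => l ++ [w])

def pvWins (ary : List Int) (K lo : Nat) : List (List Int) :=
  (List.range' lo (ary.length + 1 - K - lo)).map (fun i => (ary.drop i).take K)

-- A's two branches are exactly Dict.modify with default []
lemma pvBranch_eq_modify (d : PySem.Dict Int (List (List Int))) (cnt : Int) (tup : List Int) :
    (if d.contains cnt then d.modify cnt [] (fun l => l ++ [tup]) else d.insert cnt [tup])
      = d.modify cnt [] (fun l => l ++ [tup]) := by
  by_cases hc : d.contains cnt
  · simp [hc]
  · have hm : d.modify cnt [] (fun l => l ++ [tup]) = d.insert cnt ((d.getD cnt []) ++ [tup]) :=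
      PySem.Dict.ext_iff.mpr rfl
    have hg : d.getD cnt [] = [] := by
      rw [PySem.Dict.getD_eq_get?_getD]
      rw [(PySem.Dict.get?_eq_none_iff_contains d cnt).mpr (by simpa using hc)]
      rfl
    simp [hc, hm, hg]

-- #distinct of l ++ [x]
lemma pvSetLen_snoc (l : List Int) (x : Int) :
    ((PySem.Set.ofList (l ++ [x])).length : Int)
      = ((PySem.Set.ofList l).length : Int) + (if l.count x = 0 then 1 else 0) := by
  rw [PySem.Set.ofList_append_singleton]
  by_cases h : x ∈ l <;> simp [PySem.Set.add, List.count_eq_zero, h]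

-- length of a Nodup list after removing one value
lemma pvFilterLen (y : Int) (s : List Int) (hs : s.Nodup) :
    (List.filter (fun z => !z == y) s).length = if y ∈ s then s.length - 1 else s.length := by
  induction s with
  | nil => simp
  | cons a s ih =>
    simp only [List.nodup_cons] at hs
    by_cases hay : a = y
    · subst hay
      have : List.filter (fun z => !z == a) s = s :=
        List.filter_eq_self.mpr (fun b hb => by simp; rintro rfl; exact hs.1 hb)
      simp [this]
    · have hya : ¬ y = a := fun h => hay h.symm
      simp only [List.filter_cons, show ((fun z => !z == y) a) = true by simp [hay],
        if_true, List.length_cons, ih hs.2]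
      by_cases hy : y ∈ s
      · have : 1 ≤ s.length := List.length_pos_of_mem hy
        simp [List.mem_cons, hy, hya]; omega
      · simp [List.mem_cons, hy, hya]

-- #distinct of y :: l
lemma pvSetLen_cons (y : Int) (l : List Int) :
    ((PySem.Set.ofList (y :: l)).length : Int)
      = ((PySem.Set.ofList l).length : Int) + (if l.count y = 0 then 1 else 0) := by
  rw [PySem.Set.ofList_cons]
  have hd : (PySem.Set.ofList l).discard y = List.filter (fun z => !z == y) (PySem.Set.ofList l) := by
    simp [PySem.Set.discard]
  rw [List.length_cons, hd, pvFilterLen y _ (PySem.Set.nodup_ofList l)]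
  by_cases hy : y ∈ l
  · have hm : y ∈ PySem.Set.ofList l := (PySem.Set.mem_ofList l y).mpr hy
    have : 1 ≤ (PySem.Set.ofList l).length := List.length_pos_of_mem hm
    simp [hm, List.count_eq_zero, hy]
    omega
  · have hm : y ∉ PySem.Set.ofList l := fun hx => hy ((PySem.Set.mem_ofList l y).mp hx)
    simp [hm, List.count_eq_zero, hy]

-- sliding the window: old window plus new element = evicted element :: new window
lemma pvWinShift (pre : List Int) (x : Int) {K : Nat} (hK : 1 ≤ K) (h : K ≤ pre.length) :
    pre.drop (pre.length - K) ++ [x]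
      = pre[pre.length - K]'(by omega) :: ((pre ++ [x]).drop (pre.length + 1 - K)) := by
  rw [List.drop_append_of_le_length (by omega)]
  rw [List.drop_eq_getElem_cons (by omega)]
  simp only [List.cons_append]
  congr 2
  congr 1
  omega

-- the slice B appends is the current window
lemma pvSliceWin (ary : List Int) {K p : Nat} (hK : 1 ≤ K) (h : K ≤ p + 1) :
    PySem.List.slice ary (some ((p : Int) - (K : Int) + 1)) (some ((p : Int) + 1))
      = (ary.drop (p + 1 - K)).take K := by
  rw [PySem.List.slice_toNat ary (by omega) (by omega)]
  have h1 : ((p : Int) + 1).toNat = p + 1 := by omega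
  have h2 : ((p : Int) - (K : Int) + 1).toNat = p + 1 - K := by omega
  rw [h1, h2]
  congr 1
  omega

lemma pvLoopA_eq (ary : List Int) (K : Nat) (hK : 1 ≤ K) :
    ∀ (t m : Nat) (d : PySem.Dict Int (List (List Int))),
      ary.length + 1 - K - m ≤ t →
      pvLoopA ary (m : Int) ((m : Int) + (K : Int) - 1) d = (pvWins ary K m).foldl pvGStep d := by
  intro t
  induction t with
  | zero =>
    intro m d ht
    rw [pvLoopA]
    have hguard : ¬ ((m : Int) + (K : Int) - 1 < PySem.List.len ary) := by
      simp only [PySem.List.len_eq]; omega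
    rw [dif_neg hguard]
    have : ary.length + 1 - K - m = 0 := by omega
    simp [pvWins, this]
  | succ t ih =>
    intro m d ht
    by_cases hm : ary.length + 1 - K - m = 0
    · rw [pvLoopA]
      have hguard : ¬ ((m : Int) + (K : Int) - 1 < PySem.List.len ary) := by
        simp only [PySem.List.len_eq]; omega
      rw [dif_neg hguard]
      simp [pvWins, hm]
    · rw [pvLoopA]
      have hguard : ((m : Int) + (K : Int) - 1 < PySem.List.len ary) := by
        simp only [PySem.List.len_eq]; omega
      rw [dif_pos hguard]
      simp only
      have hslice : PySem.List.slice ary (some (m : Int)) (some ((m : Int) + (K : Int) - 1 + 1))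
          = (ary.drop m).take K := by
        rw [show ((m : Int) + (K : Int) - 1 + 1) = ((m : Int) + (K : Int)) by ring]
        rw [PySem.List.slice_toNat ary (by omega) (by omega)]
        have h1 : ((m : Int) + (K : Int)).toNat = m + K := by omega
        have h2 : ((m : Int)).toNat = m := by omega
        rw [h1, h2]
        congr 1
        omega
      rw [hslice, pvBranch_eq_modify]
      have hrec : ((m : Int) + 1) = ((m + 1 : Nat) : Int) := by push_cast; ring
      have hrec2 : ((m : Int) + (K : Int) - 1 + 1) = ((m + 1 : Nat) : Int) + (K : Int) - 1 := by
        push_cast; ring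
      rw [hrec, hrec2, ih (m + 1) _ (by omega)]
      have hwins : pvWins ary K m = ((ary.drop m).take K) :: pvWins ary K (m + 1) := by
        unfold pvWins
        rw [show ary.length + 1 - K - m = (ary.length + 1 - K - (m + 1)) + 1 by omega]
        rw [List.range'_succ]
        simp
      rw [hwins]
      rfl

lemma pvAlt_eq (ary : List Int) (K : Nat) (hK : 1 ≤ K) :
    ∀ (ys pre : List Int) (freq : PySem.Dict Int Int) (distinct : Int)
      (groups : PySem.Dict Int (List (List Int))),
      ary = pre ++ ys →
      (∀ v : Int, freq.getD v 0 = ((pre.drop (pre.length - K)).count v : Int)) →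
      distinct = ((PySem.Set.ofList (pre.drop (pre.length - K))).length : Int) →
      ((PySem.List.pyRange (pre.length : Int) (PySem.List.len ary) 1).foldl
          (pvAltStep ary (K : Int)) (freq, distinct, groups)).2.2
        = (pvWins ary K (pre.length + 1 - K)).foldl pvGStep groups := by
  intro ys
  induction ys with
  | nil =>
    intro pre freq distinct groups hary hfreq hdist
    simp only [List.append_nil] at hary
    have hpre : pre = ary := hary.symm
    subst hpre
    rw [show (PySem.List.len pre) = ((pre.length : Int)) by simp [PySem.List.len_eq]]
    rw [PySem.List.pyRange_one]
    simp [pvWins]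
  | cons x ys ih =>
    intro pre freq distinct groups hary hfreq hdist
    have hlen : ary.length = pre.length + 1 + ys.length := by subst hary; simp; omega
    set p := pre.length with hp
    have hpn : (p : Int) < PySem.List.len ary := by simp [PySem.List.len_eq]; omega
    rw [PySem.List.pyRange_one_cons hpn, List.foldl_cons]
    -- evaluate one step of B at index p
    have hxv : PySem.List.pyGetD ary (p : Int) 0 = x := by
      rw [hary, PySem.List.pyGetD_natCast]
      simp [List.getD_eq_getElem?_getD, hp, List.getElem?_append_right]
    set W : List Int := pre.drop (p - K) with hW
    set W1 : List Int := (pre ++ [x]).drop (p + 1 - K) with hW1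
    have hcx : freq.getD x 0 = (W.count x : Int) := hfreq x
    -- after the insertion of x, counts follow W ++ [x]
    have hfreq1 : ∀ v : Int, (freq.insert x (freq.getD x 0 + 1)).getD v 0
        = ((W ++ [x]).count v : Int) := by
      intro v
      by_cases hv : v = x
      · subst hv
        rw [PySem.Dict.getD_insert_self, hcx]
        simp [List.count_append]
      · rw [PySem.Dict.getD_insert_of_ne _ _ _ hv, hfreq v]
        have : ¬ x = v := fun h => hv h.symm
        simp [List.count_append, List.count_singleton, this]
    have hdist1 : (if freq.getD x 0 = 0 then distinct + 1 else distinct)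
        = ((PySem.Set.ofList (W ++ [x])).length : Int) := by
      rw [pvSetLen_snoc, hdist, hcx]
      by_cases h0 : W.count x = 0 <;> simp [h0]
    -- unified removal phase: state after the (conditional) eviction follows W1
    set freq1 : PySem.Dict Int Int := freq.insert x (freq.getD x 0 + 1) with hfq1
    set dist1 : Int := if freq.getD x 0 = 0 then distinct + 1 else distinct with hds1
    set fd := (if (K : Int) ≤ (p : Int) then
        (freq1.insert (PySem.List.pyGetD ary ((p : Int) - (K : Int)) 0)
          (freq1.getD (PySem.List.pyGetD ary ((p : Int) - (K : Int)) 0) 0 - 1),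
         if (freq1.insert (PySem.List.pyGetD ary ((p : Int) - (K : Int)) 0)
              (freq1.getD (PySem.List.pyGetD ary ((p : Int) - (K : Int)) 0) 0 - 1)).getD
              (PySem.List.pyGetD ary ((p : Int) - (K : Int)) 0) 0 = 0
         then dist1 - 1 else dist1)
      else (freq1, dist1)) with hfd
    have hfd2 : (∀ v : Int, fd.1.getD v 0 = (W1.count v : Int))
        ∧ fd.2 = ((PySem.Set.ofList W1).length : Int) := by
      by_cases hKp : (K : Int) ≤ (p : Int)
      · have hKp' : K ≤ p := by omega
        have hyv : PySem.List.pyGetD ary ((p : Int) - (K : Int)) 0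
            = pre[p - K]'(by omega) := by
          rw [show ((p : Int) - (K : Int)) = ((p - K : Nat) : Int) by omega]
          rw [hary, PySem.List.pyGetD_natCast]
          simp [List.getD_eq_getElem?_getD, List.getElem?_append, hp]
          rw [if_pos ⟨by omega, by omega⟩, List.getElem?_eq_getElem (by omega)]
          rfl
        have hshift : W ++ [x] = pre[p - K]'(by omega) :: W1 := pvWinShift pre x hK hKp'
        set y : Int := pre[p - K]'(by omega) with hy
        have hcnty : ((W ++ [x]).count y : Int) = (W1.count y : Int) + 1 := by
          rw [hshift]; simp [List.count_cons]
        have hfreq2 : ∀ v : Int, (freq1.insert y (freq1.getD y 0 - 1)).getD v 0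
            = (W1.count v : Int) := by
          intro v
          by_cases hv : v = y
          · subst hv
            rw [PySem.Dict.getD_insert_self, hfreq1, hcnty]; ring
          · rw [PySem.Dict.getD_insert_of_ne _ _ _ hv, hfreq1 v, hshift]
            have h2 : ¬ y = v := fun h => hv h.symm
            simp [List.count_cons, h2]
        have hdist2 : (if (freq1.insert y (freq1.getD y 0 - 1)).getD y 0 = 0
              then dist1 - 1 else dist1) = ((PySem.Set.ofList W1).length : Int) := by
          rw [hfreq2 y, hdist1, hshift, pvSetLen_cons]
          by_cases h0 : W1.count y = 0 <;> simp [h0] <;> ring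
        have hyv' : PySem.List.pyGetD ary ((p : Int) - (K : Int)) 0 = y := hyv
        rw [hfd, if_pos hKp, hyv']
        exact ⟨hfreq2, hdist2⟩
      · have h0 : p + 1 - K = 0 := by omega
        have h0' : p - K = 0 := by omega
        have hWW1 : W1 = W ++ [x] := by rw [hW1, hW, h0, h0']; simp
        rw [hfd, if_neg hKp]
        exact ⟨by simpa [hWW1] using hfreq1, by rw [hWW1, ← hdist1]⟩
    -- one evaluated step of pvAltStep
    have hstep : pvAltStep ary (K : Int) (freq, distinct, groups) (p : Int)
        = (fd.1, fd.2, if (K : Int) - 1 ≤ (p : Int)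
            then groups.modify fd.2 [] (fun l => l ++
              [PySem.List.slice ary (some ((p : Int) - (K : Int) + 1)) (some ((p : Int) + 1))])
            else groups) := by
      simp only [pvAltStep, hxv, hfd, hfq1, hds1]
    rw [hstep]
    have hary' : ary = (pre ++ [x]) ++ ys := by simp [hary]
    have hlen' : ((pre ++ [x]).length : Int) = (p : Int) + 1 := by simp [hp]
    have hW1' : (pre ++ [x]).drop ((pre ++ [x]).length - K) = W1 := by
      rw [hW1]; congr 1; simp [hp]
    by_cases hEm : (K : Int) - 1 ≤ (p : Int)
    · have hKp1 : K ≤ p + 1 := by omega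
      have hw : PySem.List.slice ary (some ((p : Int) - (K : Int) + 1)) (some ((p : Int) + 1))
          = (ary.drop (p + 1 - K)).take K := pvSliceWin ary hK hKp1
      have hwW1 : (ary.drop (p + 1 - K)).take K = W1 := by
        rw [hary', List.drop_append_of_le_length (by simp [hp])]
        rw [List.take_left' (by simp [hp]; omega), hW1]
      have hmod : groups.modify fd.2 [] (fun l => l ++
            [PySem.List.slice ary (some ((p : Int) - (K : Int) + 1)) (some ((p : Int) + 1))])
          = pvGStep groups W1 := by
        rw [hw, hwW1, pvGStep, hfd2.2]; rfl
      rw [if_pos hEm, hmod]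
      have hwins : pvWins ary K (p + 1 - K) = W1 :: pvWins ary K (p + 1 + 1 - K) := by
        unfold pvWins
        rw [show ary.length + 1 - K - (p + 1 - K)
            = (ary.length + 1 - K - (p + 1 + 1 - K)) + 1 by omega]
        rw [List.range'_succ, List.map_cons, hwW1]
        congr 2
        congr 1
        omega
      rw [hwins, List.foldl_cons]
      have := ih (pre ++ [x]) fd.1 fd.2 (pvGStep groups W1) hary'
        (by intro v; rw [hW1']; exact hfd2.1 v) (by rw [hW1']; exact hfd2.2)
      rw [hlen'] at this
      rw [show (pre ++ [x]).length = p + 1 from by simp [hp]] at this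
      rw [this]
    · rw [if_neg hEm]
      have := ih (pre ++ [x]) fd.1 fd.2 groups hary'
        (by intro v; rw [hW1']; exact hfd2.1 v) (by rw [hW1']; exact hfd2.2)
      rw [hlen'] at this
      rw [show (pre ++ [x]).length = p + 1 from by simp [hp]] at this
      rw [show p + 1 + 1 - K = p + 1 - K from by omega] at this
      rw [this]

-- ===== VERDICT (by name: the statement is the Claim_ definition above) =====
theorem DistinctElementsWindowSizeK_spec : Claim_equal_DistinctElementsWindowSizeK := by
  intro ary k _hdom hpre
  unfold Spec_DistinctElementsWindowSizeK DistinctElementsWindowSizeK DistinctElementsWindowSizeK_alt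
  have hk1 : (1 : Int) ≤ k := hpre
  set K : Nat := k.toNat with hKdef
  have hkK : k = (K : Int) := by omega
  have hK : 1 ≤ K := by omega
  have hA : pvLoopA ary 0 (k - 1) PySem.Dict.empty = (pvWins ary K 0).foldl pvGStep PySem.Dict.empty := by
    have := pvLoopA_eq ary K hK (ary.length + 1 - K) 0 PySem.Dict.empty (by omega)
    simpa [hkK] using this
  have hB : ((PySem.List.pyRange 0 (PySem.List.len ary) 1).foldl (pvAltStep ary k)
        (PySem.Dict.empty, 0, PySem.Dict.empty)).2.2
      = (pvWins ary K 0).foldl pvGStep PySem.Dict.empty := by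
    have := pvAlt_eq ary K hK ary [] PySem.Dict.empty 0 PySem.Dict.empty (by simp) (by intro v; simp) (by simp)
    have h0 : ([] : List Int).length + 1 - K = 0 := by simp; omega
    rw [h0] at this
    simpa [hkK] using this
  rw [hA, hB]
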